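-- pv_equiv track=rewrite | github.com/visionwx/trickle-block-util | trickle_block_util/generator.py | _combine_text_and_lineBreak_tokens
-- ===== SOURCE A (Python) =====
-- from typing import List, Optional, Union, Dict, Any
--
-- def _combine_text_and_lineBreak_tokens(tokens: List[Dict]):
--
--     newTokens = []
--     newTokenStr = ''
--     unionType = ['text', 'linebreak', 'softbreak']
--     for t in tokens:
--         if t['type'] == 'linebreak':
--             t['raw'] = '\n'
--
--         if t['type'] == 'softbreak':
--             t['raw'] = '\n'
--     i = 0
--     while i < len(tokens):
--
--         # 是text或者linebreak类型的话就累加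
--         if tokens[i]['type'] in unionType:
--             newTokenStr = newTokenStr + tokens[i]['raw']
--
--         # 一旦发现不是text或者linebreak类型， 就应该保存起来
--         else:
--
--             if newTokenStr:
--                 rawStr = newTokenStr
--                 newTokens.append({'raw': rawStr, 'type': 'text'})
--                 newTokenStr = ''
--
--             newTokens.append(tokens[i])
--
--         if i == len(tokens) - 1 and newTokenStr:
--             rawStr = newTokenStr
--             newTokens.append({'raw': rawStr, 'type': 'text'})
--         i = i + 1
--
--     return newTokens
-- ===== SOURCE B (Python) =====
-- def _combine_text_and_lineBreak_tokens(tokens):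
--     union = ('text', 'linebreak', 'softbreak')
--     for t in tokens:
--         if t['type'] in ('linebreak', 'softbreak'):
--             t['raw'] = '\n'
--     newTokens = []
--     i, n = 0, len(tokens)
--     while i < n:
--         j = i + 1
--         if tokens[i]['type'] in union:
--             while j < n and tokens[j]['type'] in union:
--                 j += 1
--             joined = ''.join(t['raw'] for t in tokens[i:j])
--             if joined:
--                 newTokens.append({'raw': joined, 'type': 'text'})
--         else:
--             while j < n and tokens[j]['type'] not in union:
--                 j += 1
--             newTokens.extend(tokens[i:j])
--         i = j
--     return newTokens
-- ===== Notes on version B (the rewrite author's own statement) =====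
-- stated objective: alternative
-- what changed: A's single running accumulator/flush state machine is replaced by run-based grouping: the token list is split into maximal runs of union (text/linebreak/softbreak) vs non-union tokens, each union run is joined into one text token (dropped when the joined string is empty) and non-union runs are copied verbatim.
import Mathlib
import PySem

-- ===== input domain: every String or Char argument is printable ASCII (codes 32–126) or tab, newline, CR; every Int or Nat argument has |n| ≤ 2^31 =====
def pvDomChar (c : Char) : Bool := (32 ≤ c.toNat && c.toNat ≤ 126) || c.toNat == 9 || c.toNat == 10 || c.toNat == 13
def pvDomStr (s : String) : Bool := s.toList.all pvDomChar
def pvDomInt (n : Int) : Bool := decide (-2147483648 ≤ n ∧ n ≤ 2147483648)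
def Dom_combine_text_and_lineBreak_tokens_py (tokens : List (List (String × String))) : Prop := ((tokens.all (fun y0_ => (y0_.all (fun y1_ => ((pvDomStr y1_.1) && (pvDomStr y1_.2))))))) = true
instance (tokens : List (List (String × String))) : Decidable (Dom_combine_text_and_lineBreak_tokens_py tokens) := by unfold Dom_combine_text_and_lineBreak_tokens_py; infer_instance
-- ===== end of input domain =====

-- B replaces A's running text-accumulator state machine by run-based grouping: it splits the
-- token list into maximal runs of union/non-union tokens, joins each union run, and copies
-- non-union runs verbatim (same return value; like A, B also mutates linebreak/softbreak
-- tokens in place in the Python, which the caller can observe — same side effect in both).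

-- ===== PORT A =====
-- t['type'] == 'linebreak' → t['raw'] = '\n'; then t['type'] == 'softbreak' → t['raw'] = '\n'
-- (a missing 'type' key is a Python KeyError: excluded by Pre_; the port reads get? = none as "not equal")
def mutateA (t : List (String × String)) : List (String × String) :=
  let t1 := if (PySem.Dict.mk t).get? "type" == some "linebreak" then ((PySem.Dict.mk t).insert "raw" "\n").items else t
  if (PySem.Dict.mk t1).get? "type" == some "softbreak" then ((PySem.Dict.mk t1).insert "raw" "\n").items else t1

-- tokens[i]['type'] in unionType (KeyError on a missing 'type' is excluded by Pre_)
def isUnionA (t : List (String × String)) : Bool :=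
  (["text", "linebreak", "softbreak"] : List String).contains (((PySem.Dict.mk t).get? "type").getD "")

-- t['raw'] — shared by both ports (KeyError on a missing 'raw' is excluded by Pre_)
def rawTok (t : List (String × String)) : String := ((PySem.Dict.mk t).get? "raw").getD ""

-- {'raw': s, 'type': 'text'} — shared by both ports
def textTok (s : String) : List (String × String) := [("raw", s), ("type", "text")]

-- the while loop: state = (newTokens, newTokenStr); 'i == len(tokens) - 1' ⟺ the rest is empty
def loopA : List (List (String × String)) → List (List (String × String)) → String → List (List (String × String))
  | [], newTokens, _ => newTokens
  | t :: rest, newTokens, s =>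
    let st :=
      if isUnionA t then (newTokens, s ++ rawTok t)
      else ((if s ≠ "" then newTokens ++ [textTok s] else newTokens) ++ [t], "")
    let acc := if rest = [] ∧ st.2 ≠ "" then st.1 ++ [textTok st.2] else st.1
    loopA rest acc st.2

def combine_text_and_lineBreak_tokens_py (tokens : List (List (String × String))) : List (List (String × String)) :=
  loopA (tokens.map mutateA) [] ""

-- ===== PORT B =====
-- if t['type'] in ('linebreak', 'softbreak'): t['raw'] = '\n'
def mutateB (t : List (String × String)) : List (String × String) :=
  if (PySem.Dict.mk t).get? "type" == some "linebreak" || (PySem.Dict.mk t).get? "type" == some "softbreak"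
  then ((PySem.Dict.mk t).insert "raw" "\n").items else t

def isUnionB (t : List (String × String)) : Bool :=
  ((PySem.Dict.mk t).get? "type").getD "" == "text" || ((PySem.Dict.mk t).get? "type").getD "" == "linebreak"
    || ((PySem.Dict.mk t).get? "type").getD "" == "softbreak"

-- ''.join(t['raw'] for t in run)
def joinB (run : List (List (String × String))) : String := run.foldl (fun s t => s ++ rawTok t) ""

-- the two inner while loops: split off the maximal run with the same union-membership as the head
def groupsB : List (List (String × String)) → List (Bool × List (List (String × String)))
  | [] => []
  | t :: rest =>
    (isUnionB t, t :: rest.takeWhile (fun x => isUnionB x == isUnionB t)) ::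
      groupsB (rest.dropWhile (fun x => isUnionB x == isUnionB t))
termination_by l => l.length
decreasing_by simpa using Nat.lt_succ_of_le (List.length_dropWhile_le _ _)

def combine_text_and_lineBreak_tokens_py_alt (tokens : List (List (String × String))) : List (List (String × String)) :=
  (groupsB (tokens.map mutateB)).foldl
    (fun acc g =>
      if g.1 then (if joinB g.2 = "" then acc else acc ++ [textTok (joinB g.2)]) else acc ++ g.2) []

-- ===== PRECONDITION & SPEC =====
-- Pre_ excludes exactly the inputs where the Python A raises KeyError: a token without a
-- 'type' key, or a token of type 'text' without a 'raw' key (linebreak/softbreak tokens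
-- are given a 'raw' by the first loop, other types are never read for 'raw').
def Pre_combine_text_and_lineBreak_tokens_py (tokens : List (List (String × String))) : Prop :=
  ∀ t ∈ tokens, (PySem.Dict.mk t).contains "type" = true ∧
    ((PySem.Dict.mk t).get? "type" = some "text" → (PySem.Dict.mk t).contains "raw" = true)
instance (tokens : List (List (String × String))) : Decidable (Pre_combine_text_and_lineBreak_tokens_py tokens) := by unfold Pre_combine_text_and_lineBreak_tokens_py; infer_instance

def pvWitness_combine_text_and_lineBreak_tokens_py : (List (List (String × String))) :=
  [[("type", "text"), ("raw", "Hi ")], [("type", "softbreak")], [("type", "linebreak"), ("raw", "x")],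
   [("type", "block_code"), ("raw", "q")], [("type", "text"), ("raw", "")]]

def Spec_combine_text_and_lineBreak_tokens_py (tokens : List (List (String × String))) (out : List (List (String × String))) : Prop := out = combine_text_and_lineBreak_tokens_py_alt tokens
instance (tokens : List (List (String × String))) (out : List (List (String × String))) : Decidable (Spec_combine_text_and_lineBreak_tokens_py tokens out) := by unfold Spec_combine_text_and_lineBreak_tokens_py; infer_instance

-- ===== CLAIM (what is proved, stated in full; the proofs are below) =====
def Claim_equal_combine_text_and_lineBreak_tokens_py : Prop := ∀ (tokens : List (List (String × String))), Dom_combine_text_and_lineBreak_tokens_py tokens → Pre_combine_text_and_lineBreak_tokens_py tokens → Spec_combine_text_and_lineBreak_tokens_py tokens (combine_text_and_lineBreak_tokens_py tokens)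

-- ===== LEMMAS AND PROOFS =====

theorem mutateA_eq_mutateB (t : List (String × String)) : mutateA t = mutateB t := by
  unfold mutateA mutateB
  rcases h : (PySem.Dict.mk t).get? "type" with _ | ty
  · simp [h]
  · by_cases h1 : ty = "linebreak"
    · subst h1
      have h2 : PySem.Dict.mk ((PySem.Dict.mk t).insert "raw" "\n").items = (PySem.Dict.mk t).insert "raw" "\n" := rfl
      have h3 := PySem.Dict.get?_insert_of_ne (PySem.Dict.mk t) "\n" (show ("type":String) ≠ "raw" by decide)
      simp [h, h2, h3]
    · by_cases h2 : ty = "softbreak" <;> simp [h, h1, h2]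

theorem isUnionB_eq_isUnionA (t : List (String × String)) : isUnionB t = isUnionA t := by
  unfold isUnionA isUnionB
  generalize (((PySem.Dict.mk t).get? "type").getD "") = g
  simp only [List.contains_cons, List.contains_nil, Bool.or_false]
  simp [Bool.or_assoc]

-- reference state machine: 'pending text s, then the rest'
def flushC (s : String) : List (List (String × String)) := if s = "" then [] else [textTok s]

def specC : List (List (String × String)) → String → List (List (String × String))
  | [], s => flushC s
  | t :: rest, s =>
    if isUnionA t then specC rest (s ++ rawTok t)
    else flushC s ++ t :: specC rest ""

theorem loopA_eq_specC (ts acc : List (List (String × String))) (s : String) (h : ts ≠ []) :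
    loopA ts acc s = acc ++ specC ts s := by
  induction ts generalizing acc s with
  | nil => exact absurd rfl h
  | cons t rest ih =>
    rw [loopA]
    by_cases hu : isUnionA t = true
    · cases rest with
      | nil =>
        simp only [hu, reduceIte, specC, flushC, true_and]
        split_ifs <;> simp_all [loopA]
      | cons r rs =>
        simp only [hu, reduceIte, List.cons_ne_nil, false_and, if_false]
        rw [ih _ _ (by simp)]
        simp [specC, hu]
    · rw [Bool.not_eq_true] at hu
      cases rest with
      | nil =>
        simp only [hu, Bool.false_eq_true, ne_eq, not_true_eq_false, and_false, if_false]
        simp [loopA, specC, flushC, hu]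
        split_ifs <;> simp
      | cons r rs =>
        simp only [hu, Bool.false_eq_true, List.cons_ne_nil, false_and, if_false]
        rw [ih _ _ (by simp)]
        simp [specC, flushC, hu]
        split_ifs <;> simp

def gOutC : List (Bool × List (List (String × String))) → List (List (String × String))
  | [] => []
  | g :: gs => (if g.1 then (if joinB g.2 = "" then [] else [textTok (joinB g.2)]) else g.2) ++ gOutC gs

theorem foldB_eq_gOutC (gs : List (Bool × List (List (String × String)))) (acc : List (List (String × String))) :
    gs.foldl (fun acc g =>
      if g.1 then (if joinB g.2 = "" then acc else acc ++ [textTok (joinB g.2)]) else acc ++ g.2) acc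
      = acc ++ gOutC gs := by
  induction gs generalizing acc with
  | nil => simp [gOutC]
  | cons g gs ih =>
    simp only [List.foldl_cons, gOutC]
    by_cases hg : g.1 = true
    · by_cases hj : joinB g.2 = "" <;> simp [hg, hj, ih]
    · rw [Bool.not_eq_true] at hg
      simp [hg, ih]

theorem specC_union_run (run rest : List (List (String × String))) (s : String)
    (h : ∀ x ∈ run, isUnionA x = true) :
    specC (run ++ rest) s = specC rest (run.foldl (fun s t => s ++ rawTok t) s) := by
  induction run generalizing s with
  | nil => simp
  | cons x xs ih =>
    have hx : isUnionA x = true := h x (by simp)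
    simp only [List.cons_append, specC, hx, reduceIte, List.foldl_cons]
    exact ih _ (fun y hy => h y (by simp [hy]))

theorem specC_flush (rest : List (List (String × String))) (s : String)
    (h : rest = [] ∨ ∃ t xs, rest = t :: xs ∧ isUnionA t = false) :
    specC rest s = flushC s ++ specC rest "" := by
  rcases h with rfl | ⟨t, xs, rfl, ht⟩
  · simp [specC, flushC]
  · simp [specC, ht, flushC]

theorem specC_nonunion_run (run rest : List (List (String × String)))
    (h : ∀ x ∈ run, isUnionA x = false) :
    specC (run ++ rest) "" = run ++ specC rest "" := by
  induction run with
  | nil => simp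
  | cons x xs ih =>
    have hx : isUnionA x = false := h x (by simp)
    simp only [List.cons_append, specC, hx, Bool.false_eq_true, reduceIte, flushC]
    simp [ih (fun y hy => h y (by simp [hy]))]

theorem dropWhile_head_not {α : Type} (p : α → Bool) (l : List α) :
    l.dropWhile p = [] ∨ ∃ h tl, l.dropWhile p = h :: tl ∧ p h = false := by
  induction l with
  | nil => exact Or.inl rfl
  | cons x xs ih =>
    by_cases hx : p x = true
    · simpa [hx] using ih
    · rw [Bool.not_eq_true] at hx
      exact Or.inr ⟨x, xs, by simp [hx], hx⟩

theorem gOutC_groupsB (ts : List (List (String × String))) : gOutC (groupsB ts) = specC ts "" := by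
  cases ts with
  | nil => simp [groupsB, gOutC, specC, flushC]
  | cons t rest =>
    rw [groupsB]
    have ih := gOutC_groupsB (rest.dropWhile (fun x => isUnionB x == isUnionB t))
    have hsplit : t :: rest =
        (t :: rest.takeWhile (fun x => isUnionB x == isUnionB t)) ++
          rest.dropWhile (fun x => isUnionB x == isUnionB t) := by
      simp [List.takeWhile_append_dropWhile]
    by_cases hu : isUnionB t = true
    · have hall : ∀ x ∈ t :: rest.takeWhile (fun x => isUnionB x == isUnionB t), isUnionA x = true := by
        intro x hx
        rcases List.mem_cons.mp hx with rfl | hx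
        · rw [← isUnionB_eq_isUnionA]; exact hu
        · have := List.mem_takeWhile_imp hx
          rw [← isUnionB_eq_isUnionA]
          simpa [hu] using this
      have hflush : specC (rest.dropWhile (fun x => isUnionB x == isUnionB t))
            (joinB (t :: rest.takeWhile (fun x => isUnionB x == isUnionB t)))
          = flushC (joinB (t :: rest.takeWhile (fun x => isUnionB x == isUnionB t))) ++
            specC (rest.dropWhile (fun x => isUnionB x == isUnionB t)) "" := by
        apply specC_flush
        rcases dropWhile_head_not (fun x => isUnionB x == isUnionB t) rest with hnil | ⟨hd, tl, heq, hp⟩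
        · exact Or.inl hnil
        · refine Or.inr ⟨hd, tl, heq, ?_⟩
          rw [← isUnionB_eq_isUnionA]
          simpa [hu] using hp
      conv_rhs => rw [hsplit]
      rw [specC_union_run _ _ _ hall]
      have hjoin : (t :: rest.takeWhile (fun x => isUnionB x == isUnionB t)).foldl
          (fun s t => s ++ rawTok t) "" = joinB (t :: rest.takeWhile (fun x => isUnionB x == isUnionB t)) := rfl
      rw [hjoin, hflush]
      rw [hu] at ih
      simp only [beq_true] at ih
      simp [gOutC, hu, ih, flushC, textTok, textTok]
    · rw [Bool.not_eq_true] at hu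
      have hall : ∀ x ∈ t :: rest.takeWhile (fun x => isUnionB x == isUnionB t), isUnionA x = false := by
        intro x hx
        rcases List.mem_cons.mp hx with rfl | hx
        · rw [← isUnionB_eq_isUnionA]; exact hu
        · have := List.mem_takeWhile_imp hx
          rw [← isUnionB_eq_isUnionA]
          simpa [hu] using this
      conv_rhs => rw [hsplit]
      rw [specC_nonunion_run _ _ hall]
      rw [hu] at ih
      simp only [beq_false] at ih
      simp [gOutC, hu, ih]
termination_by ts.length
decreasing_by simpa using Nat.lt_succ_of_le (List.length_dropWhile_le _ _)

-- ===== VERDICT (by name: the statement is the Claim_ definition above) =====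
theorem combine_text_and_lineBreak_tokens_py_spec : Claim_equal_combine_text_and_lineBreak_tokens_py := by
  intro tokens _ _
  unfold Spec_combine_text_and_lineBreak_tokens_py
  unfold combine_text_and_lineBreak_tokens_py combine_text_and_lineBreak_tokens_py_alt
  have hmap : tokens.map mutateA = tokens.map mutateB := by
    simp [mutateA_eq_mutateB]
  rw [hmap, foldB_eq_gOutC, gOutC_groupsB, List.nil_append]
  cases h : tokens.map mutateB with
  | nil => simp [loopA, specC, flushC]
  | cons t rest => rw [loopA_eq_specC _ _ _ (by simp)]; simp
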